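-- pv_equiv track=rewrite | github.com/wnsdk/Algorithm-Solution | 백준/Gold/2447. 별 찍기 － 10/별 찍기 － 10.py | f
-- ===== SOURCE A (Python) =====
-- def f(d):
--     if d == 1:
--         return ['*']
--
--     nd = d // 3
--     stars = f(nd)
--     ret = []
--
--     for star in stars:
--         ret.append(star * 3)
--     for star in stars:
--         ret.append(star + ' ' * nd + star)
--     for star in stars:
--         ret.append(star * 3)
--
--     return ret
-- ===== SOURCE B (Python) =====
-- def f(d):
--     ws = [d]
--     while ws[-1] > 1:
--         ws.append(ws[-1] // 3)
--     if ws[-1] != 1: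
--         raise ValueError("pattern size must reach 1 by integer division by 3")
--     k = len(ws) - 1
--     ret = []
--     for i in range(3 ** k):
--         s = '*'
--         x = i
--         for t in range(k, 0, -1):
--             if x % 3 == 1:
--                 s = s + ' ' * ws[t] + s
--             else:
--                 s = s + s + s
--             x //= 3
--         ret.append(s)
--     return ret
-- ===== Notes on version B (the rewrite author's own statement) =====
-- stated objective: alternative
-- what changed: Replaces A's recursive 3x3 block assembly with a non-recursive construction: B precomputes the width chain d, d//3, ..., and builds each row directly from the base-3 digits of its row index; on inputs where the chain misses 1 (A recurses forever) B raises ValueError.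
import Mathlib
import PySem

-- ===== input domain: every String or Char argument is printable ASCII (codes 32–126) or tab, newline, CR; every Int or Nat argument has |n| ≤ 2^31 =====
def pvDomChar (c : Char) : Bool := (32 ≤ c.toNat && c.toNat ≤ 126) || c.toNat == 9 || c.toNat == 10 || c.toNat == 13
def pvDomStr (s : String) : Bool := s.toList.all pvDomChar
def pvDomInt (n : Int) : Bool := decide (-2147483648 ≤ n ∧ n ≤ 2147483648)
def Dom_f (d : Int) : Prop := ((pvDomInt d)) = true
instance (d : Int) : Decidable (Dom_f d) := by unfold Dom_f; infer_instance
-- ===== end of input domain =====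

-- B drops A's recursion: it precomputes the width chain d, d//3, … and builds every row
-- directly from the base-3 digits of its row index (alternative decomposition, similar cost).


-- ===== PORT A =====
-- fuel only makes A's unbounded recursion total in Lean; on Pre_f inputs it never runs out.
-- `star * 3` is ported as `s ++ s ++ s`, `' ' * nd` as `String.ofList (List.replicate nd.toNat ' ')`
-- (exact: Python string repetition with a non-positive count is empty).
def fAux : Nat → Int → List String
  | 0, _ => []
  | fuel+1, d =>
    if d = 1 then ["*"]
    else
      let nd := PySem.Int.floordiv d 3
      let stars := fAux fuel nd
      (stars.map fun s => s ++ s ++ s)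
        ++ (stars.map fun s => s ++ String.ofList (List.replicate nd.toNat ' ') ++ s)
        ++ (stars.map fun s => s ++ s ++ s)

def f (d : Int) : List String := fAux (d.toNat + 1) d

-- ===== PORT B =====
-- the width-chain loop `ws = [d]; while ws[-1] > 1: ws.append(ws[-1] // 3)` of Source B
def mkWs (w : Int) : List Int :=
  if _h : 1 < w then w :: mkWs (PySem.Int.floordiv w 3) else [w]
termination_by w.toNat
decreasing_by
  rw [PySem.Int.floordiv_eq_ediv_of_pos (by omega : (0:Int) < 3)]
  omega

-- the inner loop `for t in range(k, 0, -1)` of Source B with its state (s, x); the row index i and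
-- x are non-negative Python ints, ported as Nat; `ws[t]` (always in range) is ported as getD.
def rowStep (ws : List Int) : Nat → String → Nat → String
  | 0, s, _ => s
  | t+1, s, x =>
      rowStep ws t
        (if x % 3 = 1 then s ++ String.ofList (List.replicate ((ws.getD (t+1) 0).toNat) ' ') ++ s
         else s ++ s ++ s)
        (x / 3)

-- `if ws[-1] != 1: raise ValueError` — Python B raises there; those inputs are outside Pre_f,
-- so the port returns [] on that branch (no value is claimed there).
def f_alt (d : Int) : List String :=
  if (mkWs d).getLast? = some 1 then
    (List.range (3 ^ ((mkWs d).length - 1))).map fun i =>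
      rowStep (mkWs d) ((mkWs d).length - 1) "*" i
  else []

-- ===== PRECONDITION & SPEC =====
-- Pre_f: exactly the inputs on which A's recursion reaches its base case 1 and returns,
-- i.e. the d whose leading base-3 digit is 1 (3^k ≤ d < 2·3^k for some k); on every other
-- input A recurses forever (RecursionError) and B raises ValueError.  The bound
-- k ≤ Nat.log2 d.toNat only makes the existential quickly decidable; it excludes nothing,
-- since 3^k ≤ d already forces 2^k ≤ d and hence k ≤ log2 d.
def Pre_f (d : Int) : Prop := ∃ k : Nat, k ≤ Nat.log2 d.toNat ∧ (3:Int) ^ k ≤ d ∧ d < 2 * 3 ^ k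
instance (d : Int) : Decidable (Pre_f d) := by unfold Pre_f; infer_instance
def pvWitness_f : Int := 3
def Spec_f (d : Int) (out : List String) : Prop := out = f_alt d
instance (d : Int) (out : List String) : Decidable (Spec_f d out) := by unfold Spec_f; infer_instance

-- ===== CLAIM (what is proved, stated in full; the proofs are below) =====
def Claim_equal_f : Prop := ∀ (d : Int), Dom_f d → Pre_f d → Spec_f d (f d)

-- ===== LEMMAS AND PROOFS =====

theorem mkWs_one : mkWs 1 = [1] := by rw [mkWs]; norm_num

theorem mkWs_head (w : Int) : (mkWs w).getD 0 0 = w := by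
  rw [mkWs]; split <;> rfl

theorem floordiv_cast (n : Nat) : PySem.Int.floordiv (n : Int) 3 = ((n / 3 : Nat) : Int) := by
  exact_mod_cast PySem.Int.floordiv_natCast n 3

theorem mkWs_step (n : Nat) (h : 1 < n) :
    mkWs (n : Int) = (n : Int) :: mkWs ((n / 3 : Nat) : Int) := by
  rw [mkWs, dif_pos (by exact_mod_cast h), floordiv_cast]

theorem br_div (k n : Nat) (h : 3 ^ (k+1) ≤ n ∧ n < 2 * 3 ^ (k+1)) :
    3 ^ k ≤ n / 3 ∧ n / 3 < 2 * 3 ^ k := by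
  have h3 : (3:Nat) ^ (k+1) = 3 * 3 ^ k := by ring
  rw [h3] at h
  omega

theorem br_ge (k n : Nat) (h : 3 ^ (k+1) ≤ n ∧ n < 2 * 3 ^ (k+1)) : 3 ≤ n := by
  have : (3:Nat) ^ 1 ≤ 3 ^ (k+1) := Nat.pow_le_pow_right (by omega) (by omega)
  simp at this
  omega

theorem mkWs_last (k : Nat) : ∀ n : Nat, 3 ^ k ≤ n ∧ n < 2 * 3 ^ k →
    (mkWs (n : Int)).getLast? = some 1 := by
  induction k with
  | zero =>
    intro n h
    have hn1 : n = 1 := by norm_num at h; omega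
    subst hn1
    norm_num [mkWs_one]
  | succ k ih =>
    intro n h
    rw [mkWs_step n (by have := br_ge k n h; omega)]
    have ih' := ih (n / 3) (br_div k n h)
    cases hm : mkWs ((n / 3 : Nat) : Int) with
    | nil => rw [hm] at ih'; simp at ih'
    | cons a l =>
      rw [hm] at ih'
      rw [List.getLast?_cons_cons]
      exact ih'

theorem mkWs_len (k : Nat) : ∀ n : Nat, 3 ^ k ≤ n ∧ n < 2 * 3 ^ k →
    (mkWs (n : Int)).length = k + 1 := by
  induction k with
  | zero =>
    intro n h
    have hn1 : n = 1 := by norm_num at h; omega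
    subst hn1
    simp [mkWs_one]
  | succ k ih =>
    intro n h
    rw [mkWs_step n (by have := br_ge k n h; omega)]
    rw [List.length_cons, ih (n / 3) (br_div k n h)]

-- peeling the LAST iteration (t = 1, the most significant digit) off the row loop
theorem rowStep_peel (t : Nat) : ∀ (ws : List Int) (s : String) (x : Nat),
    rowStep ws (t+1) s x =
      (if (x / 3 ^ t) % 3 = 1
       then rowStep (ws.drop 1) t s x
            ++ String.ofList (List.replicate ((ws.getD 1 0).toNat) ' ')
            ++ rowStep (ws.drop 1) t s x
       else rowStep (ws.drop 1) t s x ++ rowStep (ws.drop 1) t s x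
            ++ rowStep (ws.drop 1) t s x) := by
  induction t with
  | zero =>
    intro ws s x
    simp [rowStep]
  | succ t ih =>
    intro ws s x
    rw [rowStep, ih]
    have hd : x / 3 / 3 ^ t = x / 3 ^ (t+1) := by
      rw [Nat.div_div_eq_div_mul, ← pow_succ']
    rw [hd]
    have hget : ∀ m : Nat, (ws.drop 1).getD m 0 = ws.getD (m+1) 0 := by
      intro m
      cases ws <;> rfl
    have hgoal : rowStep (ws.drop 1) (t+1) s x
        = rowStep (ws.drop 1) t
            (if x % 3 = 1
             then s ++ String.ofList (List.replicate ((ws.getD (t+2) 0).toNat) ' ') ++ s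
             else s ++ s ++ s) (x / 3) := by
      rw [rowStep, hget (t+1)]
    rw [hgoal]

-- the row loop only looks at the lowest t base-3 digits of x
theorem rowStep_mod (t : Nat) : ∀ (ws : List Int) (s : String) (x y : Nat),
    x % 3 ^ t = y % 3 ^ t → rowStep ws t s x = rowStep ws t s y := by
  induction t with
  | zero => intro ws s x y _; rfl
  | succ t ih =>
    intro ws s x y h
    have h3 : (3:Nat) ^ (t+1) = 3 * 3 ^ t := by ring
    rw [h3] at h
    have hm : x % 3 = y % 3 := by
      have hx := Nat.mod_mod_of_dvd x (Dvd.intro (3 ^ t) rfl : (3:Nat) ∣ 3 * 3 ^ t)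
      have hy := Nat.mod_mod_of_dvd y (Dvd.intro (3 ^ t) rfl : (3:Nat) ∣ 3 * 3 ^ t)
      rw [← hx, ← hy, h]
    have hdm : x / 3 % 3 ^ t = y / 3 % 3 ^ t := by
      have hx : x % (3 * 3 ^ t) / 3 = x / 3 % 3 ^ t := Nat.mod_mul_right_div_self x 3 (3 ^ t)
      have hy : y % (3 * 3 ^ t) / 3 = y / 3 % 3 ^ t := Nat.mod_mul_right_div_self y 3 (3 ^ t)
      rw [← hx, ← hy, h]
    rw [rowStep, rowStep, hm, ih ws _ (x / 3) (y / 3) hdm]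

theorem falt_one : f_alt ((1 : Nat) : Int) = ["*"] := by
  have h1 : ((1 : Nat) : Int) = 1 := by norm_num
  rw [f_alt, h1, mkWs_one]
  simp [rowStep]

-- B's grid for a bracketed input splits into the same three blocks A's recursion builds
theorem falt_step (k n : Nat) (hbr : 3 ^ (k+1) ≤ n ∧ n < 2 * 3 ^ (k+1)) :
    f_alt (n : Int) =
      ((f_alt ((n / 3 : Nat) : Int)).map fun s => s ++ s ++ s)
        ++ ((f_alt ((n / 3 : Nat) : Int)).map fun s =>
              s ++ String.ofList (List.replicate (n / 3) ' ') ++ s)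
        ++ ((f_alt ((n / 3 : Nat) : Int)).map fun s => s ++ s ++ s) := by
  have hp : 0 < 3 ^ k := pow_pos (by omega) k
  have hbr' := br_div k n hbr
  have hmk : mkWs (n : Int) = (n : Int) :: mkWs ((n / 3 : Nat) : Int) :=
    mkWs_step n (by have := br_ge k n hbr; omega)
  have hlen' : (mkWs ((n / 3 : Nat) : Int)).length = k + 1 := mkWs_len k (n / 3) hbr'
  have hlen : (mkWs (n : Int)).length = k + 2 := by rw [hmk, List.length_cons, hlen']
  rw [f_alt, f_alt, if_pos (mkWs_last (k+1) n hbr), if_pos (mkWs_last k (n / 3) hbr'),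
      hlen, hlen']
  rw [show k + 2 - 1 = k + 1 from rfl, show k + 1 - 1 = k from rfl]
  rw [hmk]
  have hdrop : (((n : Int)) :: mkWs ((n / 3 : Nat) : Int)).drop 1 = mkWs ((n / 3 : Nat) : Int) := rfl
  have hsp : ((((n : Int)) :: mkWs ((n / 3 : Nat) : Int)).getD 1 0).toNat = n / 3 := by
    have : (((n : Int)) :: mkWs ((n / 3 : Nat) : Int)).getD 1 0
        = (mkWs ((n / 3 : Nat) : Int)).getD 0 0 := rfl
    rw [this, mkWs_head]
    exact Int.toNat_natCast _
  rw [show (3:Nat) ^ (k+1) = 3 ^ k + (3 ^ k + 3 ^ k) by ring, List.range_add, List.range_add]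
  simp only [List.map_append, List.map_map]
  rw [← List.append_assoc]
  congr 1
  congr 1
  · apply List.map_congr_left
    intro i hi
    rw [List.mem_range] at hi
    simp only [Function.comp_apply]
    rw [rowStep_peel, hdrop]
    rw [show i / 3 ^ k = 0 from Nat.div_eq_of_lt hi]
    norm_num
  · apply List.map_congr_left
    intro i hi
    rw [List.mem_range] at hi
    simp only [Function.comp_apply]
    rw [rowStep_peel, hdrop, hsp]
    rw [show (3 ^ k + i) / 3 ^ k = 1 by
      rw [Nat.add_comm (3 ^ k) i, Nat.add_div_right i hp, Nat.div_eq_of_lt hi]]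
    rw [rowStep_mod k _ _ (3 ^ k + i) i (by rw [Nat.add_mod_left])]
    norm_num
  · apply List.map_congr_left
    intro i hi
    rw [List.mem_range] at hi
    simp only [Function.comp_apply]
    rw [rowStep_peel, hdrop]
    rw [show (3 ^ k + (3 ^ k + i)) / 3 ^ k = 2 by
      rw [show 3 ^ k + (3 ^ k + i) = i + 3 ^ k + 3 ^ k by ring,
          Nat.add_div_right _ hp, Nat.add_div_right _ hp, Nat.div_eq_of_lt hi]]
    rw [rowStep_mod k _ _ (3 ^ k + (3 ^ k + i)) i (by rw [Nat.add_mod_left, Nat.add_mod_left])]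
    norm_num

theorem fAux_main (k : Nat) : ∀ (n : Nat) (fuel : Nat), 3 ^ k ≤ n ∧ n < 2 * 3 ^ k →
    k < fuel → fAux fuel (n : Int) = f_alt (n : Int) := by
  induction k with
  | zero =>
    intro n fuel h hf
    have hn1 : n = 1 := by norm_num at h; omega
    subst hn1
    obtain ⟨m, rfl⟩ : ∃ m, fuel = m + 1 := ⟨fuel - 1, by omega⟩
    rw [fAux, falt_one]
    norm_num
  | succ k ih =>
    intro n fuel h hf
    obtain ⟨m, rfl⟩ : ∃ m, fuel = m + 1 := ⟨fuel - 1, by omega⟩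
    have hn3 : 3 ≤ n := br_ge k n h
    rw [fAux]
    rw [if_neg (by exact_mod_cast (by omega : ¬ (n : Int) = 1))]
    simp only [floordiv_cast]
    rw [ih (n / 3) m (br_div k n h) (by omega)]
    rw [Int.toNat_natCast]
    exact (falt_step k n h).symm

-- ===== VERDICT (by name: the statement is the Claim_ definition above) =====
theorem f_spec : Claim_equal_f := by
  intro d hdom hpre
  obtain ⟨k, _, h1, h2⟩ := hpre
  unfold Spec_f f
  have hd0 : 0 < d := lt_of_lt_of_le (by positivity) h1
  obtain ⟨n, rfl⟩ : ∃ n : Nat, d = (n : Int) := ⟨d.toNat, (Int.toNat_of_nonneg (by omega)).symm⟩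
  have hbr : 3 ^ k ≤ n ∧ n < 2 * 3 ^ k := by
    constructor
    · have : ((3 ^ k : Nat) : Int) ≤ (n : Int) := by push_cast; exact h1
      exact_mod_cast this
    · have : (n : Int) < ((2 * 3 ^ k : Nat) : Int) := by push_cast; exact h2
      exact_mod_cast this
  have hkn : k < n + 1 := by
    have h1' : k < 3 ^ k := Nat.lt_pow_self (by omega)
    omega
  rw [Int.toNat_natCast]
  exact fAux_main k n (n + 1) hbr hkn
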